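-- pv_equiv track=rewrite | github.com/sdsdsdsdaf/Code | 도넛과막대그래프.py | checkNumberOfEdgesPerNode
-- ===== SOURCE A (Python) =====
-- OUTPUT = 0
--
-- INPUT = 1
--
-- def checkNumberOfEdgesPerNode(edges):
--     edges_count = {}
--
--     for edge in edges:
--         if not edges_count.get(edge[0]):
--             edges_count[edge[0]] = [0,0] #[ a번 노드에서 나가는 간선의 수, a번 노드로 들어오는 간선의 수 ]
--
--         if not edges_count.get(edge[1]):
--             edges_count[edge[1]] = [0,0]
--
--         edges_count[edge[0]][OUTPUT] += 1
--         edges_count[edge[1]][INPUT] += 1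
--
--     return edges_count
-- ===== SOURCE B (Python) =====
-- def checkNumberOfEdgesPerNode(edges):
--     out = {}
--     for e in edges:
--         out[e[0]] = out.get(e[0], 0) + 1
--     inc = {}
--     for e in edges:
--         inc[e[1]] = inc.get(e[1], 0) + 1
--     keys = []
--     seen = set()
--     for e in edges:
--         for n in (e[0], e[1]):
--             if n not in seen:
--                 seen.add(n)
--                 keys.append(n)
--     return {n: [out.get(n, 0), inc.get(n, 0)] for n in keys}
-- ===== Notes on version B (the rewrite author's own statement) =====
-- stated objective: alternative
-- what changed: A builds one dict in a single interleaved pass that conditionally inserts [0,0] records and mutates them in place; B tabulates out-degrees and in-degrees in two separate count tables plus a first-occurrence key list, then assembles the result dict in one combining pass.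
import Mathlib
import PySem

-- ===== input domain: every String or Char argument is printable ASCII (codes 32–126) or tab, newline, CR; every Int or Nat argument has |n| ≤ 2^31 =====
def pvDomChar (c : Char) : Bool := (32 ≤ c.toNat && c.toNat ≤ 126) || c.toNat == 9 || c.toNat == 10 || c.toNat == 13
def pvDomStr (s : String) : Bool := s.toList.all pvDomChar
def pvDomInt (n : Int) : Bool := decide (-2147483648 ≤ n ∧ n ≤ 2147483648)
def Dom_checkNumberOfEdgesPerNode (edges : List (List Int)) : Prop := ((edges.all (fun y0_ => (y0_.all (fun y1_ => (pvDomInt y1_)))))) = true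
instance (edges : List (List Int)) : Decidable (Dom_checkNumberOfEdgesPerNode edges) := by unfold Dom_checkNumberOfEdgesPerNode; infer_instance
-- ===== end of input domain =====

-- B replaces A's single interleaved mutating pass by three separate tabulations (out-counts, in-counts,
-- first-occurrence key order) joined in one final combining map; objective: alternative decomposition.

-- ===== PORT A =====
-- Python's `not edges_count.get(k)`: None (missing) and [] are falsy
def pvFalsy (o : Option (List Int)) : Bool :=
  match o with
  | none => true
  | some v => v.isEmpty

-- Python's `v[i] += 1` on the stored pair-list (i is 0 or 1, always in range here)
def pvBump (i : Nat) (v : List Int) : List Int :=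
  v.set i (PySem.List.pyGetD v (i : Int) 0 + 1)

def pvStepA (d : PySem.Dict Int (List Int)) (edge : List Int) : PySem.Dict Int (List Int) :=
  match PySem.List.pyGet? edge 0, PySem.List.pyGet? edge 1 with
  | some a, some b =>
    let d1 := if pvFalsy (d.get? a) then d.insert a [0, 0] else d
    let d2 := if pvFalsy (d1.get? b) then d1.insert b [0, 0] else d1
    let d3 := d2.modify a [] (pvBump 0)
    d3.modify b [] (pvBump 1)
  | _, _ => d   -- unreachable under Pre_ (edge shorter than 2 raises IndexError in Python)

def checkNumberOfEdgesPerNode (edges : List (List Int)) : List (Int × List Int) :=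
  (edges.foldl pvStepA PySem.Dict.empty).items

-- ===== PORT B =====
-- `if n not in seen: seen.add(n); keys.append(n)`
def pvAddKey (st : PySem.Set Int × List Int) (n : Int) : PySem.Set Int × List Int :=
  if PySem.Set.contains st.1 n then st else (PySem.Set.add st.1 n, st.2 ++ [n])

def checkNumberOfEdgesPerNode_alt (edges : List (List Int)) : List (Int × List Int) :=
  let outD := edges.foldl (fun d e =>
      match PySem.List.pyGet? e 0 with
      | some a => d.insert a (d.getD a 0 + 1)
      | none => d) PySem.Dict.empty
  let incD := edges.foldl (fun d e =>
      match PySem.List.pyGet? e 1 with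
      | some b => d.insert b (d.getD b 0 + 1)
      | none => d) PySem.Dict.empty
  let ks := (edges.foldl (fun st e =>
      match PySem.List.pyGet? e 0, PySem.List.pyGet? e 1 with
      | some a, some b => pvAddKey (pvAddKey st a) b
      | _, _ => st) ((PySem.Set.empty : PySem.Set Int), ([] : List Int))).2
  ks.map (fun n => (n, [outD.getD n 0, incD.getD n 0]))

-- ===== PRECONDITION & SPEC =====
-- Pre_ excludes exactly the inputs where Python A raises IndexError: an edge with fewer than 2 entries.
def Pre_checkNumberOfEdgesPerNode (edges : List (List Int)) : Prop :=
  ∀ e ∈ edges, 2 ≤ e.length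
instance (edges : List (List Int)) : Decidable (Pre_checkNumberOfEdgesPerNode edges) := by
  unfold Pre_checkNumberOfEdgesPerNode; infer_instance

def pvWitness_checkNumberOfEdgesPerNode : List (List Int) := [[1, 2], [2, 3], [3, 1]]

def Spec_checkNumberOfEdgesPerNode (edges : List (List Int)) (out : List (Int × List Int)) : Prop := out = checkNumberOfEdgesPerNode_alt edges
instance (edges : List (List Int)) (out : List (Int × List Int)) : Decidable (Spec_checkNumberOfEdgesPerNode edges out) := by unfold Spec_checkNumberOfEdgesPerNode; infer_instance

-- ===== CLAIM (what is proved, stated in full; the proofs are below) =====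
def Claim_equal_checkNumberOfEdgesPerNode : Prop := ∀ (edges : List (List Int)), Dom_checkNumberOfEdgesPerNode edges → Pre_checkNumberOfEdgesPerNode edges → Spec_checkNumberOfEdgesPerNode edges (checkNumberOfEdgesPerNode edges)

-- ===== LEMMAS AND PROOFS =====

-- the (src, dst) pair of each edge, on the domain where every edge has ≥ 2 entries
def pvPairs (edges : List (List Int)) : List (Int × Int) :=
  edges.map (fun e => (PySem.List.pyGetD e 0 0, PySem.List.pyGetD e 1 0))

def pvFlat (ps : List (Int × Int)) : List Int := ps.flatMap (fun p => [p.1, p.2])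

def pvKeys (ps : List (Int × Int)) : PySem.Set Int := PySem.Set.ofList (pvFlat ps)

def pvVal (ps : List (Int × Int)) (n : Int) : List Int :=
  [((ps.map Prod.fst).count n : Int), ((ps.map Prod.snd).count n : Int)]

def pvStepAB (d : PySem.Dict Int (List Int)) (p : Int × Int) : PySem.Dict Int (List Int) :=
  let d1 := if pvFalsy (d.get? p.1) then d.insert p.1 [0, 0] else d
  let d2 := if pvFalsy (d1.get? p.2) then d1.insert p.2 [0, 0] else d1
  let d3 := d2.modify p.1 [] (pvBump 0)
  d3.modify p.2 [] (pvBump 1)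

lemma pvPyGet?_cons_zero (x y : Int) (t : List Int) :
    PySem.List.pyGet? (x :: y :: t) 0 = some x := by
  simp [PySem.List.pyGet?, PySem.List.pyIdx?]
  rw [if_pos (by positivity)]
  simp

lemma pvPyGet?_cons_one (x y : Int) (t : List Int) :
    PySem.List.pyGet? (x :: y :: t) 1 = some y := by
  simp [PySem.List.pyGet?, PySem.List.pyIdx?]

lemma pvPyGetD_cons_zero (x y : Int) (t : List Int) :
    PySem.List.pyGetD (x :: y :: t) 0 0 = x := by
  simp [PySem.List.pyGetD]

lemma pvPyGetD_cons_one (x y : Int) (t : List Int) :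
    PySem.List.pyGetD (x :: y :: t) 1 0 = y := by
  simp [PySem.List.pyGetD]

lemma pvEdgeShape (e : List Int) (he : 2 ≤ e.length) : ∃ x y t, e = x :: y :: t := by
  match e, he with | x :: y :: t, _ => exact ⟨x, y, t, rfl⟩

lemma pvA_fold_pairs (edges : List (List Int)) (h : ∀ e ∈ edges, 2 ≤ e.length) :
    ∀ d, edges.foldl pvStepA d = (pvPairs edges).foldl pvStepAB d := by
  induction edges with
  | nil => intro d; rfl
  | cons e es ih =>
    intro d
    obtain ⟨x, y, t, rfl⟩ := pvEdgeShape e (h e (List.mem_cons_self))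
    simp only [pvPairs, List.map_cons, List.foldl_cons]
    rw [ih (fun e' he' => h e' (List.mem_cons_of_mem _ he'))]
    congr 1
    · simp only [pvStepA, pvStepAB, pvPyGet?_cons_zero, pvPyGet?_cons_one,
        pvPyGetD_cons_zero, pvPyGetD_cons_one]

lemma pvBump_zero (u v : Int) : pvBump 0 [u, v] = [u + 1, v] := by
  simp [pvBump]

lemma pvBump_one (u v : Int) : pvBump 1 [u, v] = [u, v + 1] := by
  simp [pvBump, pvPyGetD_cons_one]

lemma pvGet?_char (d : PySem.Dict Int (List Int)) (K : PySem.Set Int) (V : Int → List Int)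
    (hk : d.keys = K) (hv : ∀ n ∈ K, d.getD n [] = V n) (n : Int) :
    d.get? n = if n ∈ K then some (V n) else none := by
  by_cases hn : n ∈ K
  · have hc : d.contains n = true := (PySem.Dict.contains_iff_mem_keys d n).2 (by rw [hk]; exact hn)
    rw [PySem.Dict.contains_eq_isSome_get?] at hc
    obtain ⟨v, hv'⟩ := Option.isSome_iff_exists.mp hc
    have hVn : V n = v := (hv n hn).symm.trans (PySem.Dict.getD_of_get?_eq_some d [] hv')
    rw [hv', if_pos hn, hVn]
  · rw [if_neg hn]
    exact (PySem.Dict.get?_eq_none_iff_not_mem_keys d n).2 (by rw [hk]; exact hn)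

lemma pvInsStep (d : PySem.Dict Int (List Int)) (K : PySem.Set Int) (V : Int → List Int)
    (hk : d.keys = K) (hv : ∀ n ∈ K, d.getD n [] = V n)
    (hz : ∀ n, n ∉ K → V n = [0, 0]) (hne : ∀ n, V n ≠ []) (a : Int) :
    (if pvFalsy (d.get? a) then d.insert a [0, 0] else d).keys = PySem.Set.add K a ∧
    ∀ n ∈ PySem.Set.add K a,
      (if pvFalsy (d.get? a) then d.insert a [0, 0] else d).getD n [] = V n := by
  by_cases ha : a ∈ K
  · have h1 : d.get? a = some (V a) := by rw [pvGet?_char d K V hk hv a, if_pos ha]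
    have hf : pvFalsy (d.get? a) = false := by
      rw [h1]; simp [pvFalsy, hne a]
    rw [if_neg (by simp [hf])]
    refine ⟨by rw [hk, PySem.Set.add_of_mem ha], ?_⟩
    intro n hn
    rw [PySem.Set.add_of_mem ha] at hn
    exact hv n hn
  · have h1 : d.get? a = none := by rw [pvGet?_char d K V hk hv a, if_neg ha]
    have hc : d.contains a = false := by rw [PySem.Dict.contains_eq_isSome_get?, h1]; rfl
    rw [if_pos (by rw [h1]; rfl)]
    refine ⟨?_, ?_⟩
    · rw [PySem.Dict.keys_insert_of_not_contains d _ hc, hk, PySem.Set.add_of_not_mem ha]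
    · intro n hn
      rw [PySem.Dict.getD_insert]
      by_cases hna : n = a
      · rw [if_pos hna, hna, hz a ha]
      · rw [if_neg hna]
        exact hv n (((PySem.Set.mem_add K a n).1 hn).resolve_right hna)

lemma pvVal_of_not_mem (ps : List (Int × Int)) (n : Int) (h : n ∉ pvKeys ps) :
    pvVal ps n = [0, 0] := by
  simp only [pvKeys, PySem.Set.mem_ofList, pvFlat, List.mem_flatMap] at h
  push Not at h
  have h0 : (ps.map Prod.fst).count n = 0 := by
    rw [List.count_eq_zero]
    intro hm
    obtain ⟨p, hp, hpe⟩ := List.mem_map.1 hm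
    exact h p hp (by rw [← hpe]; simp)
  have h1 : (ps.map Prod.snd).count n = 0 := by
    rw [List.count_eq_zero]
    intro hm
    obtain ⟨p, hp, hpe⟩ := List.mem_map.1 hm
    exact h p hp (by rw [← hpe]; simp)
  simp [pvVal, h0, h1]

lemma pvKeys_append (ps : List (Int × Int)) (a b : Int) :
    pvKeys (ps ++ [(a, b)]) = PySem.Set.add (PySem.Set.add (pvKeys ps) a) b := by
  have : pvFlat (ps ++ [(a, b)]) = (pvFlat ps ++ [a]) ++ [b] := by
    simp [pvFlat]
  rw [pvKeys, this, PySem.Set.ofList_append_singleton, PySem.Set.ofList_append_singleton]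
  rfl

lemma pvAInv (ps : List (Int × Int)) :
    (ps.foldl pvStepAB PySem.Dict.empty).keys = pvKeys ps ∧
    ∀ n ∈ pvKeys ps, (ps.foldl pvStepAB PySem.Dict.empty).getD n [] = pvVal ps n := by
  induction ps using List.reverseRecOn with
  | nil =>
    refine ⟨by simp [pvKeys, pvFlat, PySem.Dict.keys_empty, PySem.Set.ofList_nil], ?_⟩
    intro n hn
    simp [pvKeys, pvFlat, PySem.Set.ofList_nil] at hn
  | append_singleton ps p ih =>
    obtain ⟨a, b⟩ := p
    obtain ⟨hk, hv⟩ := ih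
    rw [List.foldl_append, List.foldl_cons, List.foldl_nil]
    set d := ps.foldl pvStepAB PySem.Dict.empty with hd
    have hne : ∀ n, pvVal ps n ≠ [] := fun n => by simp [pvVal]
    have hz : ∀ n, n ∉ pvKeys ps → pvVal ps n = [0, 0] := fun n h => pvVal_of_not_mem ps n h
    obtain ⟨hk1, hv1⟩ := pvInsStep d (pvKeys ps) (pvVal ps) hk hv hz hne a
    set d1 := if pvFalsy (d.get? a) then d.insert a [0, 0] else d with hd1
    have hz1 : ∀ n, n ∉ PySem.Set.add (pvKeys ps) a → pvVal ps n = [0, 0] := by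
      intro n h
      exact hz n (fun hm => h ((PySem.Set.mem_add _ a n).2 (Or.inl hm)))
    obtain ⟨hk2, hv2⟩ := pvInsStep d1 (PySem.Set.add (pvKeys ps) a) (pvVal ps) hk1 hv1 hz1 hne b
    set d2 := if pvFalsy (d1.get? b) then d1.insert b [0, 0] else d1 with hd2
    set K2 := PySem.Set.add (PySem.Set.add (pvKeys ps) a) b with hK2
    have haK2 : a ∈ K2 := (PySem.Set.mem_add _ b a).2 (Or.inl ((PySem.Set.mem_add _ a a).2 (Or.inr rfl)))
    have hbK2 : b ∈ K2 := (PySem.Set.mem_add _ b b).2 (Or.inr rfl)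
    have hca : d2.contains a = true := (PySem.Dict.contains_iff_mem_keys d2 a).2 (by rw [hk2]; exact haK2)
    have hkeys3 : (d2.modify a [] (pvBump 0)).keys = K2 := by
      rw [PySem.Dict.keys_modify, PySem.Dict.keys_insert_of_contains d2 _ hca, hk2]
    have hcb : (d2.modify a [] (pvBump 0)).contains b = true :=
      (PySem.Dict.contains_iff_mem_keys _ b).2 (by rw [hkeys3]; exact hbK2)
    have hkeys4 : ((d2.modify a [] (pvBump 0)).modify b [] (pvBump 1)).keys = K2 := by
      rw [PySem.Dict.keys_modify, PySem.Dict.keys_insert_of_contains _ _ hcb, hkeys3]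
    have hstep : pvStepAB d (a, b) = (d2.modify a [] (pvBump 0)).modify b [] (pvBump 1) := by
      rw [pvStepAB]
    refine ⟨?_, ?_⟩
    · rw [hstep, hkeys4, pvKeys_append]
    · intro n hn
      rw [pvKeys_append] at hn
      rw [hstep, PySem.Dict.getD_modify, PySem.Dict.getD_modify, PySem.Dict.getD_modify]
      have hga : d2.getD a [] = pvVal ps a := hv2 a haK2
      have hgb : d2.getD b [] = pvVal ps b := hv2 b hbK2
      have hgn : n ∈ K2 → d2.getD n [] = pvVal ps n := hv2 n
      by_cases h1 : n = b <;> by_cases h2 : n = a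
      · subst h1; subst h2
        simp [hga, pvVal, pvBump_zero, pvBump_one, List.count_append]
      · subst h1
        simp [h2, hgb, pvVal, pvBump_one, List.count_append,
          Ne.symm h2]
      · subst h2
        simp [h1, hga, pvVal, pvBump_zero, List.count_append,
          Ne.symm h1]
      · have hgnn := hgn hn
        simp [h1, h2, hgnn, pvVal, List.count_append,
          Ne.symm h1, Ne.symm h2]

lemma pvB_out (edges : List (List Int)) (h : ∀ e ∈ edges, 2 ≤ e.length) :
    ∀ d : PySem.Dict Int Int, edges.foldl (fun d e =>
      match PySem.List.pyGet? e 0 with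
      | some a => d.insert a (d.getD a 0 + 1)
      | none => d) d
      = ((pvPairs edges).map Prod.fst).foldl (fun d x => d.insert x (d.getD x 0 + 1)) d := by
  induction edges with
  | nil => intro d; rfl
  | cons e es ih =>
    intro d
    obtain ⟨x, y, t, rfl⟩ := pvEdgeShape e (h e (List.mem_cons_self))
    simp only [pvPairs, List.map_cons, List.foldl_cons,
      pvPyGet?_cons_zero, pvPyGetD_cons_zero, pvPyGetD_cons_one]
    exact ih (fun e' he' => h e' (List.mem_cons_of_mem _ he')) _

lemma pvB_in (edges : List (List Int)) (h : ∀ e ∈ edges, 2 ≤ e.length) :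
    ∀ d : PySem.Dict Int Int, edges.foldl (fun d e =>
      match PySem.List.pyGet? e 1 with
      | some b => d.insert b (d.getD b 0 + 1)
      | none => d) d
      = ((pvPairs edges).map Prod.snd).foldl (fun d x => d.insert x (d.getD x 0 + 1)) d := by
  induction edges with
  | nil => intro d; rfl
  | cons e es ih =>
    intro d
    obtain ⟨x, y, t, rfl⟩ := pvEdgeShape e (h e (List.mem_cons_self))
    simp only [pvPairs, List.map_cons, List.foldl_cons,
      pvPyGet?_cons_one, pvPyGetD_cons_zero, pvPyGetD_cons_one]
    exact ih (fun e' he' => h e' (List.mem_cons_of_mem _ he')) _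

lemma pvAddKey_diag (s : PySem.Set Int) (n : Int) :
    pvAddKey (s, (s : List Int)) n = (PySem.Set.add s n, (PySem.Set.add s n : List Int)) := by
  by_cases hc : n ∈ s
  · simp [pvAddKey, PySem.Set.add_of_mem hc]
    exact hc
  · have hcf : PySem.Set.contains s n = false := by
      rw [← Bool.not_eq_true]
      exact fun h => hc ((PySem.Set.contains_iff s n).1 h)
    simp [pvAddKey, PySem.Set.add_of_not_mem hc]
    exact hc

lemma pvB_keys (edges : List (List Int)) (h : ∀ e ∈ edges, 2 ≤ e.length) :
    ∀ s : PySem.Set Int, (edges.foldl (fun st e =>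
      match PySem.List.pyGet? e 0, PySem.List.pyGet? e 1 with
      | some a, some b => pvAddKey (pvAddKey st a) b
      | _, _ => st) (s, (s : List Int)))
      = (PySem.Set.update s (pvFlat (pvPairs edges)), (PySem.Set.update s (pvFlat (pvPairs edges)) : List Int)) := by
  induction edges with
  | nil => intro s; simp [pvPairs, pvFlat, PySem.Set.update_nil]
  | cons e es ih =>
    intro s
    obtain ⟨x, y, t, rfl⟩ := pvEdgeShape e (h e List.mem_cons_self)
    simp only [List.foldl_cons, pvPyGet?_cons_zero, pvPyGet?_cons_one]
    rw [pvAddKey_diag, pvAddKey_diag, ih (fun e' he' => h e' (List.mem_cons_of_mem _ he'))]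
    have hfl : pvFlat (pvPairs ((x :: y :: t) :: es)) = x :: y :: pvFlat (pvPairs es) := by
      simp [pvPairs, pvFlat, pvPyGetD_cons_one]
    rw [hfl, PySem.Set.update_cons, PySem.Set.update_cons]

-- ===== VERDICT (by name: the statement is the Claim_ definition above) =====
theorem checkNumberOfEdgesPerNode_spec : Claim_equal_checkNumberOfEdgesPerNode := by
  intro edges _ hpre
  show checkNumberOfEdgesPerNode edges = checkNumberOfEdgesPerNode_alt edges
  simp only [checkNumberOfEdgesPerNode, checkNumberOfEdgesPerNode_alt]
  rw [pvA_fold_pairs edges hpre PySem.Dict.empty, pvB_out edges hpre PySem.Dict.empty,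
    pvB_in edges hpre PySem.Dict.empty]
  rw [show ((PySem.Set.empty : PySem.Set Int), ([] : List Int))
      = ((PySem.Set.empty : PySem.Set Int), (PySem.Set.empty : List Int)) from rfl]
  rw [pvB_keys edges hpre PySem.Set.empty]
  obtain ⟨hk, hv⟩ := pvAInv (pvPairs edges)
  rw [PySem.Dict.items_eq_map_keys _ (by rw [hk]; exact PySem.Set.nodup_ofList _) ([] : List Int)]
  rw [hk]
  have hupd : PySem.Set.update (PySem.Set.empty : PySem.Set Int) (pvFlat (pvPairs edges))
      = pvKeys (pvPairs edges) := PySem.Set.update_nil_left _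
  rw [hupd]
  apply List.map_congr_left
  intro n hn
  rw [hv n hn, PySem.Dict.getD_foldl_insert_add_one, PySem.Dict.getD_foldl_insert_add_one,
    PySem.Dict.getD_empty]
  simp [pvVal]
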